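-- pv_equiv track=rewrite | github.com/Chalmers-Tavlingsprogrammering/chalmerschallenge21 | Uppgifter/chactl/submissions/accepted/chactl_greedy.py | jumps_required
-- ===== SOURCE A (Python) =====
-- def jumps_required(n):
--     assert n >= 0
--
--     jumpsize = 2**26
--     ans = 0
--     while n > 0:
--         while abs(n - jumpsize) > abs(n - jumpsize // 2):
--             jumpsize //= 2
--         ans += 1
--         n = abs(n - jumpsize)
--     return ans
-- ===== SOURCE B (Python) =====
-- def jumps_required(n):
--     # Same greedy nearest-power-of-two jumps as A, but each jump is computed
--     # in closed form from n.bit_length() (A's initial jumpsize 2**26 caps every jump).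
--     assert n >= 0
--     MAXJUMP = 1 << 26
--     ans = 0
--     while n > 0:
--         k = n.bit_length()
--         lo, hi = 1 << (k - 1), 1 << k
--         jump = min(hi if hi - n <= n - lo else lo, MAXJUMP)
--         ans += 1
--         n = abs(n - jump)
--     return ans
-- ===== Notes on version B (the rewrite author's own statement) =====
-- stated objective: simpler
-- what changed: B removes A's persistent jumpsize and its inner monotone-shrinking scan: each iteration computes the two candidate powers of two around n in closed form from n.bit_length() (capped at A's initial jumpsize 2**26) and picks the nearer one, tie to the larger, so the greedy jump is arithmetic instead of a scan.
import Mathlib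
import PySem

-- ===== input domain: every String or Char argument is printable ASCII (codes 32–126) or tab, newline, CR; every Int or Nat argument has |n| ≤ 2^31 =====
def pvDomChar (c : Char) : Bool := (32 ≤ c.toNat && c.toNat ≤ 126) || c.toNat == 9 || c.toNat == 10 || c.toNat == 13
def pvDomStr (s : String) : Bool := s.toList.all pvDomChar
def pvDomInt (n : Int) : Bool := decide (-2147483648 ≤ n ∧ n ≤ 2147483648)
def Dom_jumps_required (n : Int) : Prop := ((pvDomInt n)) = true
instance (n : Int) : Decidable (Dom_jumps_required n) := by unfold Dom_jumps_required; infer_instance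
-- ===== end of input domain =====

-- B replaces A's inner jumpsize-shrinking scan by a closed-form bit_length computation of each greedy jump (objective: simpler).

-- ===== PORT A =====
-- floor(j/2) brackets j (used by the termination proofs of the A-side loops)
theorem jrFd2_bounds (j : Int) :
    2 * PySem.Int.floordiv j 2 ≤ j ∧ j ≤ 2 * PySem.Int.floordiv j 2 + 1 := by
  have h := PySem.Int.floordiv_mul_add_mod j 2
  rcases PySem.Int.mod_two_eq j with h2 | h2 <;> omega

-- the inner 'while' shrinks |jumpsize|: its recursive call decreases j.natAbs
theorem jrShrink_measure (n j : Int)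
    (h : |n - j| > |n - PySem.Int.floordiv j 2|) :
    (PySem.Int.floordiv j 2).natAbs < j.natAbs := by
  have hb := jrFd2_bounds j
  rcases eq_or_ne (PySem.Int.floordiv j 2) j with he | he
  · rw [he] at h; exact absurd h (lt_irrefl _)
  · omega

-- inner loop: while abs(n - jumpsize) > abs(n - jumpsize // 2): jumpsize //= 2
def jrShrink (n j : Int) : Int :=
  if h : |n - j| > |n - PySem.Int.floordiv j 2| then jrShrink n (PySem.Int.floordiv j 2) else j
termination_by j.natAbs
decreasing_by exact jrShrink_measure n j h

-- after the inner loop the jump is positive and strictly shrinks n (termination of the outer loop)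
theorem jrShrink_progress (n : Int) (hn : 0 < n) (j : Int) (hj : 0 < j) :
    0 < jrShrink n j ∧ |n - jrShrink n j| < n := by
  induction j using jrShrink.induct (n := n) with
  | case1 j hcond ih =>
    rw [jrShrink, dif_pos hcond]
    have hb := jrFd2_bounds j
    rcases le_or_gt j 1 with h1 | h1
    · -- j = 1: the shrink condition |n-1| > |n-0| is false for n ≥ 1
      exfalso
      have hj1 : j = 1 := by omega
      subst hj1
      have hfd : PySem.Int.floordiv (1:Int) 2 = 0 := by decide
      rw [hfd, gt_iff_lt, Int.abs_eq_natAbs, Int.abs_eq_natAbs] at hcond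
      omega
    · exact ih (by omega)
  | case2 j hcond =>
    rw [jrShrink, dif_neg hcond]
    have hb := jrFd2_bounds j
    refine ⟨hj, ?_⟩
    rw [gt_iff_lt, Int.abs_eq_natAbs, Int.abs_eq_natAbs] at hcond
    rw [Int.abs_eq_natAbs]
    omega

def jrLoop (n j ans : Int) : Int :=
  -- '0 < j' is a totality guard only: the loop is entered with j = 2^26 and jrShrink keeps j positive
  if h : 0 < n ∧ 0 < j then
    jrLoop (|n - jrShrink n j|) (jrShrink n j) (ans + 1)
  else ans
termination_by n.toNat
decreasing_by
  have := jrShrink_progress n h.1 j h.2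
  omega

def jumps_required (n : Int) : Int :=
  jrLoop n (2 ^ 26) 0

-- ===== PORT B =====
-- the jump Source B computes each iteration: nearer of the two bit_length powers, tie to larger, capped at 2^26
def jrJump (n : Int) : Int :=
  let k := PySem.Int.bitLength n
  let lo : Int := 2 ^ (k - 1)
  let hi : Int := 2 ^ k
  min (if hi - n ≤ n - lo then hi else lo) (2 ^ 26)

-- bit_length brackets n between two powers of two (Int form of the PySem lemmas)
theorem jrBits (n : Int) (hn : 0 < n) :
    1 ≤ PySem.Int.bitLength n ∧
    (2:Int) ^ (PySem.Int.bitLength n - 1) ≤ n ∧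
    n < (2:Int) ^ PySem.Int.bitLength n ∧
    (2:Int) ^ PySem.Int.bitLength n = 2 * 2 ^ (PySem.Int.bitLength n - 1) := by
  have hk1 : 1 ≤ PySem.Int.bitLength n := by
    have h := PySem.Int.lt_two_pow_bitLength n
    by_contra hc
    interval_cases (PySem.Int.bitLength n) <;> omega
  have hlo : (2:Int) ^ (PySem.Int.bitLength n - 1) ≤ n := by
    have h := PySem.Int.two_pow_bitLength_le n (by omega)
    have h2 : ((2 ^ (PySem.Int.bitLength n - 1) : Nat) : Int) ≤ (n.natAbs : Int) :=
      Int.ofNat_le.mpr h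
    push_cast [Nat.cast_ofNat] at h2
    rwa [abs_of_pos hn] at h2
  have hhi : n < (2:Int) ^ PySem.Int.bitLength n := by
    have h := PySem.Int.lt_two_pow_bitLength n
    have h2 : (n.natAbs : Int) < ((2 ^ PySem.Int.bitLength n : Nat) : Int) :=
      Int.ofNat_lt.mpr h
    push_cast [Nat.cast_ofNat] at h2
    rwa [abs_of_pos hn] at h2
  have hd := (pow_succ (2:Int) (PySem.Int.bitLength n - 1)).symm
  have hk : PySem.Int.bitLength n - 1 + 1 = PySem.Int.bitLength n := by omega
  rw [hk] at hd
  exact ⟨hk1, hlo, hhi, by omega⟩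

-- Source B's jump strictly shrinks n (termination)
theorem jrJump_progress (n : Int) (hn : 0 < n) :
    0 < jrJump n ∧ |n - jrJump n| < n := by
  obtain ⟨hk1, hlo, hhi, hd⟩ := jrBits n hn
  have hlopos : (0:Int) < 2 ^ (PySem.Int.bitLength n - 1) := by positivity
  have hcap : (0:Int) < 2 ^ 26 := by positivity
  unfold jrJump
  simp only [min_def]
  split_ifs <;> rw [Int.abs_eq_natAbs] <;> omega

def jrLoopB (n ans : Int) : Int :=
  if h : 0 < n then
    jrLoopB (|n - jrJump n|) (ans + 1)
  else ans
termination_by n.toNat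
decreasing_by
  have := jrJump_progress n h
  omega

def jumps_required_alt (n : Int) : Int :=
  jrLoopB n 0

-- ===== PRECONDITION & SPEC =====
-- A's 'assert n >= 0' raises AssertionError on negative n (B's assert raises too): excluded.
def Pre_jumps_required (n : Int) : Prop := 0 ≤ n
instance (n : Int) : Decidable (Pre_jumps_required n) := by unfold Pre_jumps_required; infer_instance
def pvWitness_jumps_required : Int := (5)
def Spec_jumps_required (n : Int) (out : Int) : Prop := out = jumps_required_alt n
instance (n : Int) (out : Int) : Decidable (Spec_jumps_required n out) := by unfold Spec_jumps_required; infer_instance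

-- ===== CLAIM (what is proved, stated in full; the proofs are below) =====
def Claim_equal_jumps_required : Prop := ∀ (n : Int), Dom_jumps_required n → Pre_jumps_required n → Spec_jumps_required n (jumps_required n)

-- ===== LEMMAS AND PROOFS =====

-- loop invariant of A: the persistent jumpsize is a power of two ≤ 2^26, and n ≤ jumpsize unless jumpsize is still 2^26
def jrInv (n j : Int) : Prop := ∃ e : Nat, e ≤ 26 ∧ j = 2 ^ e ∧ (n ≤ j ∨ j = 2 ^ 26)

theorem jrShrink_stop (n j : Int) (h : ¬ |n - j| > |n - PySem.Int.floordiv j 2|) :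
    jrShrink n j = j := by
  rw [jrShrink, dif_neg h]

theorem jrShrink_step (n j : Int) (h : |n - j| > |n - PySem.Int.floordiv j 2|) :
    jrShrink n j = jrShrink n (PySem.Int.floordiv j 2) := by
  rw [jrShrink, dif_pos h]

-- once the jump is no larger than n the inner loop stops at once
theorem jrShrink_stop_of_le (n j : Int) (hj : 0 < j) (hnj : j ≤ n) : jrShrink n j = j := by
  apply jrShrink_stop
  have hb := jrFd2_bounds j
  rw [gt_iff_lt, Int.abs_eq_natAbs, Int.abs_eq_natAbs]
  omega

theorem jrFd_pow (e : Nat) : PySem.Int.floordiv ((2:Int) ^ (e + 1)) 2 = 2 ^ e := by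
  rw [PySem.Int.floordiv_eq_iff_of_pos (by omega)]
  have hp : ((2:Int) ^ e) > 0 := by positivity
  constructor
  · rw [pow_succ]
  · rw [pow_succ]; omega

-- above 2^26 B's capped jump is exactly 2^26
theorem jrJump_big (n : Int) (hbig : (2:Int) ^ 26 ≤ n) : jrJump n = 2 ^ 26 := by
  have hn : 0 < n := lt_of_lt_of_le (by positivity) hbig
  obtain ⟨hk1, hlo, hhi, hd⟩ := jrBits n hn
  have hk27 : 27 ≤ PySem.Int.bitLength n := by
    by_contra hc
    have : (2:Int) ^ PySem.Int.bitLength n ≤ 2 ^ 26 :=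
      pow_le_pow_right₀ (by omega) (by omega)
    omega
  have hlo26 : (2:Int) ^ 26 ≤ 2 ^ (PySem.Int.bitLength n - 1) :=
    pow_le_pow_right₀ (by omega) (by omega)
  unfold jrJump
  simp only [min_def]
  split_ifs <;> omega

-- below 2^26 the cap is inactive: B's jump is the nearer bracketing power (tie to the larger)
theorem jrJump_small (n : Int) (hn : 0 < n) (hsmall : n < (2:Int) ^ 26) :
    jrJump n = if (2:Int) ^ PySem.Int.bitLength n - n ≤ n - 2 ^ (PySem.Int.bitLength n - 1)
               then (2:Int) ^ PySem.Int.bitLength n else 2 ^ (PySem.Int.bitLength n - 1) := by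
  obtain ⟨hk1, hlo, hhi, hd⟩ := jrBits n hn
  have hk26 : PySem.Int.bitLength n ≤ 26 := by
    by_contra hc
    have : (2:Int) ^ 26 ≤ 2 ^ (PySem.Int.bitLength n - 1) :=
      pow_le_pow_right₀ (by omega) (by omega)
    omega
  have hhicap : (2:Int) ^ PySem.Int.bitLength n ≤ 2 ^ 26 :=
    pow_le_pow_right₀ (by omega) (by omega)
  have hlocap : (2:Int) ^ (PySem.Int.bitLength n - 1) ≤ 2 ^ 26 :=
    pow_le_pow_right₀ (by omega) (by omega)
  unfold jrJump
  simp only [min_def]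
  split_ifs <;> omega

-- under the invariant, A's shrink loop lands exactly on B's closed-form jump
theorem jrShrink_eq_jrJump (n j : Int) (hn : 0 < n) (hinv : jrInv n j) :
    jrShrink n j = jrJump n := by
  obtain ⟨e, he26, hj, hcase⟩ := hinv
  obtain ⟨hk1, hlo, hhi, hd⟩ := jrBits n hn
  rcases le_or_gt ((2:Int) ^ 26) n with hbig | hsmall
  · -- n ≥ 2^26: the invariant forces j = 2^26 and the loop keeps it
    have hj26 : j = 2 ^ 26 := by
      rcases hcase with hle | h26
      · have : (2:Int) ^ e ≤ 2 ^ 26 := pow_le_pow_right₀ (by omega) he26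
        omega
      · exact h26
    subst hj26
    rw [jrShrink_stop_of_le n _ (by positivity) hbig, jrJump_big n hbig]
  · -- n < 2^26: so n ≤ j, and the loop halves j = 2^e down to B's choice
    have hnj : n ≤ j := by
      rcases hcase with hle | h26
      · exact hle
      · omega
    rw [jrJump_small n hn hsmall]
    subst hj
    -- induction peeling one halving 2^e → 2^(e-1) at a time while 2^e is above 2^k
    clear hcase he26
    induction e with
    | zero =>
      -- n ≤ 1 and lo = 1: n = 1, k = 1, stop at 1 = lo
      have hn1 : n = 1 := by simp at hnj; omega
      subst hn1
      have hk : PySem.Int.bitLength (1:Int) = 1 := by decide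
      rw [show ((2:Int) ^ 0) = 1 from by norm_num,
        jrShrink_stop_of_le 1 1 one_pos (le_refl _), hk]
      norm_num
    | succ m ih =>
      have hfd : PySem.Int.floordiv ((2:Int) ^ (m + 1)) 2 = 2 ^ m := jrFd_pow m
      have hm : (0:Int) < 2 ^ m := by positivity
      rcases lt_trichotomy (m + 1) (PySem.Int.bitLength n) with hlt | heq | hgt
      · -- 2^(m+1) ≤ 2^(k-1) ≤ n: impossible together with n ≤ 2^(m+1) unless equality; stop
        have : (2:Int) ^ (m + 1) ≤ 2 ^ (PySem.Int.bitLength n - 1) :=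
          pow_le_pow_right₀ (by omega) (by omega)
        -- n = 2^(m+1) = 2^(k-1): k - 1 = m + 1, n = lo, pick lo
        have hne : n = 2 ^ (m + 1) := by omega
        have hkm : PySem.Int.bitLength n - 1 = m + 1 := by
          have h1 : (2:Int) ^ (m+1) < 2 ^ (PySem.Int.bitLength n) := by omega
          have h2 : m + 1 < PySem.Int.bitLength n := by
            by_contra hc
            have : (2:Int) ^ (PySem.Int.bitLength n) ≤ 2 ^ (m+1) :=
              pow_le_pow_right₀ (by omega) (by omega)
            omega
          by_contra hc
          have h3 : m + 1 + 1 ≤ PySem.Int.bitLength n - 1 := by omega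
          have : (2:Int) ^ (m + 2) ≤ 2 ^ (PySem.Int.bitLength n - 1) :=
            pow_le_pow_right₀ (by omega) (by omega)
          have h4 : (2:Int) ^ (m + 2) = 2 * 2 ^ (m + 1) := by rw [pow_succ]; ring
          omega
        rw [jrShrink_stop_of_le n _ (by positivity) (by omega)]
        rw [if_neg (by rw [hkm] at *; omega), hkm]
      · -- 2^(m+1) = hi: one comparison decides between hi and lo
        rw [← heq] at hlo hhi hd ⊢
        simp only [Nat.add_sub_cancel] at hlo hd ⊢
        rcases le_or_gt ((2:Int) ^ (m + 1) - n) (n - 2 ^ m) with htie | hfar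
        · -- hi is at least as близко: stop at hi
          rw [jrShrink_stop n _ (by
            rw [hfd, gt_iff_lt, Int.abs_eq_natAbs, Int.abs_eq_natAbs]
            omega)]
          rw [if_pos htie]
        · -- lo is strictly nearer: shrink once, then stop at lo ≤ n
          rw [jrShrink_step n _ (by
            rw [hfd, gt_iff_lt, Int.abs_eq_natAbs, Int.abs_eq_natAbs]
            omega)]
          rw [hfd, jrShrink_stop_of_le n _ hm hlo]
          rw [if_neg (by omega)]
      · -- 2^(m+1) is still above hi: the loop certainly halves; apply the IH at 2^m
        have hge : (2:Int) ^ PySem.Int.bitLength n ≤ 2 ^ m :=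
          pow_le_pow_right₀ (by omega) (by omega)
        rw [jrShrink_step n _ (by
          rw [hfd, gt_iff_lt, Int.abs_eq_natAbs, Int.abs_eq_natAbs]
          have : (2:Int) ^ (m + 1) = 2 * 2 ^ m := by rw [pow_succ]; ring
          omega)]
        rw [hfd]
        exact ih (by omega)

-- the invariant is preserved across one iteration
theorem jrInv_next (n : Int) (hn : 0 < n) : jrInv (|n - jrJump n|) (jrJump n) := by
  rcases le_or_gt ((2:Int) ^ 26) n with hbig | hsmall
  · rw [jrJump_big n hbig]
    exact ⟨26, le_refl _, rfl, Or.inr rfl⟩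
  · obtain ⟨hk1, hlo, hhi, hd⟩ := jrBits n hn
    have hk26 : PySem.Int.bitLength n ≤ 26 := by
      by_contra hc
      have : (2:Int) ^ 26 ≤ 2 ^ (PySem.Int.bitLength n - 1) :=
        pow_le_pow_right₀ (by omega) (by omega)
      omega
    rw [jrJump_small n hn hsmall]
    split_ifs with h
    · exact ⟨PySem.Int.bitLength n, hk26, rfl, Or.inl (by
        rw [Int.abs_eq_natAbs]; omega)⟩
    · exact ⟨PySem.Int.bitLength n - 1, by omega, rfl, Or.inl (by
        rw [Int.abs_eq_natAbs]
        have : (0:Int) < 2 ^ (PySem.Int.bitLength n - 1) := by positivity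
        omega)⟩

theorem jrLoop_eq_jrLoopB (fuel : Nat) (n j ans : Int) (hfuel : n.toNat ≤ fuel)
    (hn : 0 ≤ n) (hinv : jrInv n j) : jrLoop n j ans = jrLoopB n ans := by
  induction fuel generalizing n j ans with
  | zero =>
    have hn0 : n = 0 := by omega
    subst hn0
    rw [jrLoop, jrLoopB]; simp
  | succ m ih =>
    rcases eq_or_lt_of_le hn with h0 | hpos
    · rw [jrLoop, jrLoopB]; simp [← h0]
    · have hj : 0 < j := by
        obtain ⟨e, _, hj, _⟩ := hinv; subst hj; positivity
      rw [jrLoop, dif_pos ⟨hpos, hj⟩, jrLoopB, dif_pos hpos]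
      rw [jrShrink_eq_jrJump n j hpos hinv]
      have hprog := jrJump_progress n hpos
      exact ih _ _ _ (by omega) (abs_nonneg _) (jrInv_next n hpos)

-- ===== VERDICT (by name: the statement is the Claim_ definition above) =====
theorem jumps_required_spec : Claim_equal_jumps_required := by
  intro n _ hpre
  unfold Spec_jumps_required jumps_required jumps_required_alt
  refine jrLoop_eq_jrLoopB n.toNat n _ 0 (le_refl _) hpre ⟨26, le_refl _, rfl, ?_⟩
  rcases le_or_gt n ((2:Int) ^ 26) with h | h
  · exact Or.inl h
  · exact Or.inr rfl
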